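-- pv_equiv track=rewrite | github.com/lMoonHawk/AoC-py | 2016/day_14.py | in_a_row
-- ===== SOURCE A (Python) =====
-- def in_a_row(s):
--     counter, streak, char = 1, None, None
--     for k in range(1, len(s)):
--         if s[k] == s[k - 1]:
--             counter += 1
--             if (counter == 3 and not streak) or (counter == 5 and streak == 3):
--                 streak = counter
--                 char = s[k]
--                 if streak == 5:
--                     return streak, char
--         else:
--             counter = 1
--     return streak, char
-- ===== SOURCE B (Python) =====
-- def in_a_row(s):
--     # Run-length encode s, then pick the first run of length >= 5, else the first of length >= 3.
--     runs = []
--     for c in s: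
--         if runs and runs[-1][0] == c:
--             runs[-1] = (c, runs[-1][1] + 1)
--         else:
--             runs.append((c, 1))
--     for c, n in runs:
--         if n >= 5:
--             return 5, c
--     for c, n in runs:
--         if n >= 3:
--             return 3, c
--     return None, None
-- ===== Notes on version B (the rewrite author's own statement) =====
-- stated objective: alternative
-- what changed: Replaces A's one-pass counter/streak state machine with a run-length encoding of the string followed by two simple scans: first run of length >= 5, else first run of length >= 3.
import Mathlib
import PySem

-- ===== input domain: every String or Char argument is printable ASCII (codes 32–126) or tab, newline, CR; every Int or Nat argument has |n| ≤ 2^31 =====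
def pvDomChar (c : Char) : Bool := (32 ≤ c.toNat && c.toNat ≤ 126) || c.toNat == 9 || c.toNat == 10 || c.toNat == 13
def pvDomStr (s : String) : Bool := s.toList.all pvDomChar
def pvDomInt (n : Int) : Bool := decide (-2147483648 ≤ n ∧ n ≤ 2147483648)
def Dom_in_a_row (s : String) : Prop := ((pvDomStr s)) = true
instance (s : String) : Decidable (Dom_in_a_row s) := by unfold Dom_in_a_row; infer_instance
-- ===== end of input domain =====

-- B replaces A's one-pass counter/streak state machine by a run-length encoding of the
-- string followed by two scans (first run ≥ 5, else first run ≥ 3); alternative, same cost.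

-- ===== PORT A =====
-- loop 'for k in range(1, len(s))' with early return, state (counter, streak, char)
def in_a_row_go (cs : List Char) (ks : List Int) (counter : Int) (streak : Option Int)
    (char : Option String) : Option Int × Option String :=
  match ks with
  | [] => (streak, char)
  | k :: rest =>
    if PySem.List.pyGet? cs k = PySem.List.pyGet? cs (k - 1) then
      let counter' := counter + 1
      if (counter' = 3 ∧ streak = none) ∨ (counter' = 5 ∧ streak = some 3) then
        let char' := (PySem.List.pyGet? cs k).map (fun c => String.ofList [c])
        if counter' = 5 then (some counter', char')
        else in_a_row_go cs rest counter' (some counter') char'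
      else in_a_row_go cs rest counter' streak char
    else in_a_row_go cs rest 1 streak char

def in_a_row (s : String) : Option Int × Option String :=
  in_a_row_go s.toList (PySem.List.pyRange 1 (s.toList.length : Int) 1) 1 none none

-- ===== PORT B =====
-- extend the run-length encoding by one character (Source B's first loop body)
def pushRun (runs : List (Char × Int)) (c : Char) : List (Char × Int) :=
  match runs.getLast? with
  | some (c0, n) => if c0 = c then runs.dropLast ++ [(c, n + 1)] else runs ++ [(c, 1)]
  | none => [(c, 1)]

-- Source B's two scanning loops over the finished run list
def runAnswer (runs : List (Char × Int)) : Option Int × Option String :=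
  match runs.find? (fun p => decide (5 ≤ p.2)) with
  | some (c, _) => (some 5, some (String.ofList [c]))
  | none =>
    match runs.find? (fun p => decide (3 ≤ p.2)) with
    | some (c, _) => (some 3, some (String.ofList [c]))
    | none => (none, none)

def in_a_row_alt (s : String) : Option Int × Option String :=
  runAnswer (s.toList.foldl pushRun [])

-- ===== PRECONDITION & SPEC =====
def Spec_in_a_row (s : String) (out : Option Int × Option String) : Prop := out = in_a_row_alt s
instance (s : String) (out : Option Int × Option String) : Decidable (Spec_in_a_row s out) := by unfold Spec_in_a_row; infer_instance

-- ===== CLAIM (what is proved, stated in full; the proofs are below) =====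
def Claim_equal_in_a_row : Prop := ∀ (s : String), Dom_in_a_row s → Spec_in_a_row s (in_a_row s)

-- ===== LEMMAS AND PROOFS =====

-- A's loop rewritten over the character list (prev = s[k-1], rest = chars from k on)
def scanA (prev : Char) (rest : List Char) (counter : Int) (streak : Option Int)
    (char : Option String) : Option Int × Option String :=
  match rest with
  | [] => (streak, char)
  | c :: rest' =>
    if c = prev then
      let counter' := counter + 1
      if (counter' = 3 ∧ streak = none) ∨ (counter' = 5 ∧ streak = some 3) then
        if counter' = 5 then (some counter', some (String.ofList [c]))
        else scanA c rest' counter' (some counter') (some (String.ofList [c]))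
      else scanA c rest' counter' streak char
    else scanA c rest' 1 streak char

theorem go_eq_scanA (rest : List Char) : ∀ (pre : List Char) (c : Char) (counter : Int)
    (streak : Option Int) (char : Option String),
    in_a_row_go (pre ++ c :: rest)
      (PySem.List.pyRange ((pre.length : Int) + 1) ((pre.length : Int) + 1 + rest.length) 1)
      counter streak char = scanA c rest counter streak char := by
  induction rest with
  | nil =>
    intro pre c counter streak char
    simp [PySem.List.pyRange_one_eq_nil, in_a_row_go, scanA]
  | cons d rest' ih =>
    intro pre c counter streak char
    rw [PySem.List.pyRange_one_cons (by simp only [List.length_cons]; push_cast; omega)]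
    have h1 : PySem.List.pyGet? (pre ++ c :: d :: rest') ((pre.length : Int) + 1) = some d := by
      have h := PySem.List.pyGet?_append_length (pre := pre ++ [c]) (y := d) (ys := rest')
      simpa using h
    have h2 : PySem.List.pyGet? (pre ++ c :: d :: rest') ((pre.length : Int) + 1 - 1) = some c := by
      have h := PySem.List.pyGet?_append_length (pre := pre) (y := c) (ys := d :: rest')
      simpa using h
    have hr : PySem.List.pyRange ((pre.length : Int) + 1 + 1)
        ((pre.length : Int) + 1 + ((d :: rest').length : Int)) 1 =
        PySem.List.pyRange (((pre ++ [c]).length : Int) + 1)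
        (((pre ++ [c]).length : Int) + 1 + (rest'.length : Int)) 1 := by
      have e1 : ((pre.length : Int) + 1 + 1) = (((pre ++ [c]).length : Int) + 1) := by
        simp only [List.length_append, List.length_cons, List.length_nil]
        push_cast; ring
      have e2 : ((pre.length : Int) + 1 + ((d :: rest').length : Int)) =
          (((pre ++ [c]).length : Int) + 1 + (rest'.length : Int)) := by
        simp only [List.length_append, List.length_cons, List.length_nil]
        push_cast; ring
      rw [e1, e2]
    have ihc := fun counter streak char => ih (pre ++ [c]) d counter streak char
    simp only [List.append_assoc, List.singleton_append] at ihc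
    unfold in_a_row_go scanA
    rw [h1, h2, hr]
    simp only [Option.some.injEq, Option.map_some]
    by_cases hdc : d = c
    · rw [if_pos hdc, if_pos hdc]
      by_cases hcond : (counter + 1 = 3 ∧ streak = none) ∨ (counter + 1 = 5 ∧ streak = some 3)
      · rw [if_pos hcond, if_pos hcond]
        by_cases h5 : counter + 1 = 5
        · rw [if_pos h5, if_pos h5]
        · rw [if_neg h5, if_neg h5, ihc]
      · rw [if_neg hcond, if_neg hcond, ihc]
    · rw [if_neg hdc, if_neg hdc, ihc]

-- bumping the final run's count preserves the first run reaching a threshold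
theorem find?_bump (t : Int) (rs : List (Char × Int)) (prev : Char) (n : Int) (c0 : Char)
    (h : (List.find? (fun p => decide (t ≤ p.2)) (rs ++ [(prev, n)])).map Prod.fst = some c0) :
    (List.find? (fun p => decide (t ≤ p.2)) (rs ++ [(prev, n + 1)])).map Prod.fst = some c0 := by
  rw [List.find?_append] at h ⊢
  cases hrs : List.find? (fun p => decide (t ≤ p.2)) rs with
  | some r => rw [hrs] at h; simpa using h
  | none =>
    rw [hrs] at h
    by_cases ht : t ≤ n
    · have ht' : t ≤ n + 1 := by omega
      simp [ht] at h
      simp [ht', h]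
    · simp [ht] at h

-- extending the encoding by one character preserves the first run reaching a threshold
theorem find?_push (t : Int) (runs : List (Char × Int)) (c : Char) (c0 : Char)
    (h : (List.find? (fun p => decide (t ≤ p.2)) runs).map Prod.fst = some c0) :
    (List.find? (fun p => decide (t ≤ p.2)) (pushRun runs c)).map Prod.fst = some c0 := by
  rcases runs.eq_nil_or_concat with rfl | ⟨rs, ⟨c1, n⟩, rfl⟩
  · simp at h
  · simp only [List.concat_eq_append] at h ⊢
    have hpush : pushRun (rs ++ [(c1, n)]) c =
        if c1 = c then rs ++ [(c, n + 1)] else (rs ++ [(c1, n)]) ++ [(c, 1)] := by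
      unfold pushRun
      simp
    rw [hpush]
    by_cases hc : c1 = c
    · subst hc
      rw [if_pos rfl]
      exact find?_bump t rs c1 n c0 h
    · rw [if_neg hc, List.find?_append]
      obtain ⟨r, hf, hr⟩ := Option.map_eq_some_iff.mp h
      rw [hf]
      simp [hr]

-- once a run ≥ 5 exists, the rest of the fold cannot change the answer
theorem runAnswer_stable (rest : List Char) : ∀ (runs : List (Char × Int)) (c0 : Char),
    (List.find? (fun p => decide (5 ≤ p.2)) runs).map Prod.fst = some c0 →
    runAnswer (List.foldl pushRun runs rest) = (some 5, some (String.ofList [c0])) := by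
  induction rest with
  | nil =>
    intro runs c0 h
    obtain ⟨⟨c, m⟩, hf, hc⟩ := Option.map_eq_some_iff.mp h
    simp only [List.foldl_nil, runAnswer, hf]
    simp_all
  | cons c rest' ih =>
    intro runs c0 h
    exact ih (pushRun runs c) c0 (find?_push 5 runs c c0 h)

-- the main simulation invariant
theorem scanA_eq_runAnswer (rest : List Char) : ∀ (rs : List (Char × Int)) (prev : Char)
    (counter : Int) (streak : Option Int) (char : Option String),
    1 ≤ counter → counter < 5 → (∀ r ∈ rs, r.2 < 5) →
    ((streak = none ∧ char = none ∧ (∀ r ∈ rs, r.2 < 3) ∧ counter < 3) ∨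
      (∃ c0, streak = some 3 ∧ char = some (String.ofList [c0]) ∧
        (List.find? (fun p => decide (3 ≤ p.2)) (rs ++ [(prev, counter)])).map Prod.fst = some c0)) →
    scanA prev rest counter streak char =
      runAnswer (List.foldl pushRun (rs ++ [(prev, counter)]) rest) := by
  induction rest with
  | nil =>
    intro rs prev counter streak char h1 h5 hrs hinv
    have hnone5 : List.find? (fun p => decide (5 ≤ p.2)) (rs ++ [(prev, counter)]) = none := by
      apply List.find?_eq_none.mpr
      intro r hr
      simp only [List.mem_append, List.mem_singleton] at hr
      rcases hr with hr | rfl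
      · have := hrs r hr; simp; omega
      · simp; omega
    rcases hinv with ⟨hs, hc, hrs3, hcnt3⟩ | ⟨c0, hs, hc, hfind⟩
    · subst hs; subst hc
      have hnone3 : List.find? (fun p => decide (3 ≤ p.2)) (rs ++ [(prev, counter)]) = none := by
        apply List.find?_eq_none.mpr
        intro r hr
        simp only [List.mem_append, List.mem_singleton] at hr
        rcases hr with hr | rfl
        · have := hrs3 r hr; simp; omega
        · simp; omega
      simp [scanA, runAnswer, hnone5, hnone3]
    · subst hs; subst hc
      obtain ⟨⟨c, m⟩, hf, hcc⟩ := Option.map_eq_some_iff.mp hfind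
      simp only [scanA, List.foldl_nil, runAnswer, hnone5, hf]
      simp_all
  | cons c rest' ih =>
    intro rs prev counter streak char h1 h5 hrs hinv
    simp only [List.foldl_cons]
    by_cases hc : c = prev
    · subst hc
      have hpush : pushRun (rs ++ [(c, counter)]) c = rs ++ [(c, counter + 1)] := by
        unfold pushRun
        simp
      rw [hpush]
      unfold scanA
      rw [if_pos rfl]
      by_cases hcond : (counter + 1 = 3 ∧ streak = none) ∨ (counter + 1 = 5 ∧ streak = some 3)
      · by_cases hc5 : counter + 1 = 5
        · rw [if_pos hcond, if_pos hc5]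
          rw [hc5]
          have hfind5 : (List.find? (fun p => decide (5 ≤ p.2)) (rs ++ [(c, (5:Int))])).map
              Prod.fst = some c := by
            rw [List.find?_append]
            have : List.find? (fun p => decide (5 ≤ p.2)) rs = none := by
              apply List.find?_eq_none.mpr
              intro r hr; have := hrs r hr; simp; omega
            simp [this]
          rw [show counter + 1 = (5:Int) from hc5] at *
          exact (runAnswer_stable rest' (rs ++ [(c, 5)]) c hfind5).symm
        · rw [if_pos hcond, if_neg hc5]
          -- condition held and counter' ≠ 5, so counter' = 3 and streak was none
          have hc3 : counter + 1 = 3 ∧ streak = none := by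
            rcases hcond with h | h
            · exact h
            · exact absurd h.1 hc5
          obtain ⟨hc3', hsn⟩ := hc3
          have hrs3 : ∀ r ∈ rs, r.2 < 3 := by
            rcases hinv with ⟨_, _, h, _⟩ | ⟨c0, hs, _, _⟩
            · exact h
            · rw [hsn] at hs; exact absurd hs (by simp)
          apply ih rs c (counter + 1) (some (counter + 1)) (some (String.ofList [c]))
            (by omega) (by omega) hrs
          right
          refine ⟨c, by rw [hc3'], rfl, ?_⟩
          rw [List.find?_append]
          have : List.find? (fun p => decide (3 ≤ p.2)) rs = none := by
            apply List.find?_eq_none.mpr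
            intro r hr; have := hrs3 r hr; simp; omega
          simp [this]; omega
      · rw [if_neg hcond]
        have hc5' : counter + 1 < 5 := by
          rcases hinv with ⟨hs, _, _, hcnt3⟩ | ⟨c0, hs, _, _⟩
          · omega
          · by_contra hge
            exact hcond (Or.inr ⟨by omega, hs⟩)
        apply ih rs c (counter + 1) streak char (by omega) hc5' hrs
        rcases hinv with ⟨hs, hcc, hrs3, hcnt3⟩ | ⟨c0, hs, hcc, hfind⟩
        · left
          refine ⟨hs, hcc, hrs3, ?_⟩
          by_contra hge
          exact hcond (Or.inl ⟨by omega, hs⟩)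
        · right
          exact ⟨c0, hs, hcc, find?_bump 3 rs c counter c0 hfind⟩
    · have hpush : pushRun (rs ++ [(prev, counter)]) c = (rs ++ [(prev, counter)]) ++ [(c, 1)] := by
        unfold pushRun
        simp only [List.getLast?_concat, List.dropLast_concat]
        rw [if_neg (by intro h; exact hc h.symm)]
      rw [hpush]
      unfold scanA
      rw [if_neg hc]
      apply ih (rs ++ [(prev, counter)]) c 1 streak char (by omega) (by omega)
      · intro r hr
        simp only [List.mem_append, List.mem_singleton] at hr
        rcases hr with hr | rfl
        · exact hrs r hr
        · omega
      · rcases hinv with ⟨hs, hcc, hrs3, hcnt3⟩ | ⟨c0, hs, hcc, hfind⟩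
        · left
          refine ⟨hs, hcc, ?_, by omega⟩
          intro r hr
          simp only [List.mem_append, List.mem_singleton] at hr
          rcases hr with hr | rfl
          · exact hrs3 r hr
          · omega
        · right
          refine ⟨c0, hs, hcc, ?_⟩
          rw [List.find?_append (xs := rs ++ [(prev, counter)])]
          cases hfl : List.find? (fun p => decide (3 ≤ p.2)) (rs ++ [(prev, counter)]) with
          | some r => rw [hfl] at hfind; simpa using hfind
          | none => rw [hfl] at hfind; simp at hfind

-- ===== VERDICT (by name: the statement is the Claim_ definition above) =====
theorem in_a_row_spec : Claim_equal_in_a_row := by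
  intro s _
  unfold Spec_in_a_row
  show in_a_row s = in_a_row_alt s
  unfold in_a_row in_a_row_alt
  cases hcs : s.toList with
  | nil => simp [PySem.List.pyRange_one_eq_nil, in_a_row_go, runAnswer]
  | cons c rest =>
    have h1 := go_eq_scanA rest [] c 1 none none
    simp only [List.nil_append, List.length_nil, Nat.cast_zero, zero_add] at h1
    have hlen : ((c :: rest).length : Int) = 1 + (rest.length : Int) := by
      simp; ring
    rw [hlen, h1]
    have h2 := scanA_eq_runAnswer rest [] c 1 none none (by omega) (by omega)
      (by simp) (Or.inl ⟨rfl, rfl, by simp, by omega⟩)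
    have hinit : List.foldl pushRun [] (c :: rest) = List.foldl pushRun [(c, 1)] rest := by
      simp [pushRun]
    simp only [List.nil_append] at h2
    rw [hinit, h2]
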